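-- pv_equiv track=rewrite | github.com/AnirveshArcot/Luhn-Algorithm | functionslist.py | card_format
-- ===== SOURCE A (Python) =====
-- def convertlist(list1):  #convert list into a string
--     str = ''
--     for i in list1:
--         str += i
--     return str
--
-- def card_format(numb):   #Function to format card numbers into a credit card like fashion
--     formlist = []
--     listnum=list(str(numb))
--     for index1 , digit1 in enumerate(listnum):
--         if index1%4==0:
--             formlist.append(" ")
--             formlist.append(digit1)
--         else:
--             formlist.append(digit1)
--     formlist.pop(0)
--     cardstr=convertlist(formlist)
--     return cardstr
-- ===== SOURCE B (Python) =====
-- def card_format(numb):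
--     s = str(numb)
--     return ' '.join(s[i:i+4] for i in range(0, len(s), 4))
-- ===== Notes on version B (the rewrite author's own statement) =====
-- stated objective: idiomatic
-- what changed: Replaces the per-character enumerate loop with modulo test plus leading-space pop by slicing the string into fixed-width four-character chunks and joining them with a single space via str.join.
import Mathlib
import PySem

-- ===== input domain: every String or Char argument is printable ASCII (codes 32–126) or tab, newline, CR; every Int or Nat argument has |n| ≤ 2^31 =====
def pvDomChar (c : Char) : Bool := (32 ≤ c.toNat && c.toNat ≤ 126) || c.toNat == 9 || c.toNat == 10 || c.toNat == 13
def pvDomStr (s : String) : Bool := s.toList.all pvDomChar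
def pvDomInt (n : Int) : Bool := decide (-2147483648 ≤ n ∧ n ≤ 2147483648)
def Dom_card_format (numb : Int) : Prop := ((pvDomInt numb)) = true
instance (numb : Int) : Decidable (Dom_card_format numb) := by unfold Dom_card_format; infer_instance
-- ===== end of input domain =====

-- B replaces A's per-character enumerate loop (space before every 4th char, then pop the
-- leading space) by slicing the string into 4-char chunks and joining them with ' ' (idiomatic).


-- ===== PORT A =====
-- convertlist: Python concatenates the 1-character strings of the list; here the list is the
-- corresponding List Char and the final string is built once with String.ofList (exact).
def pvConvertlist (list1 : List Char) : String :=
  String.ofList (list1.foldl (fun acc c => acc ++ [c]) [])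

def card_format (numb : Int) : String :=
  let listnum : List Char := (PySem.Int.toStr numb).toList
  let formlist : List Char := (PySem.List.enumerate listnum 0).foldl
    (fun acc p => if PySem.Int.mod p.1 4 == 0 then (acc ++ [' ']) ++ [p.2] else acc ++ [p.2]) []
  match PySem.List.pop? formlist 0 with
  | some r => pvConvertlist r.2
  | none => ""  -- unreachable: str(numb) is never empty, so formlist is never empty

-- ===== PORT B =====
def card_format_alt (numb : Int) : String :=
  let s := PySem.Int.toStr numb
  PySem.Str.join " "
    ((PySem.List.pyRange 0 (PySem.Str.len s) 4).map (fun i => PySem.Str.slice s (some i) (some (i + 4))))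

-- ===== PRECONDITION & SPEC =====
def Spec_card_format (numb : Int) (out : String) : Prop := out = card_format_alt numb
instance (numb : Int) (out : String) : Decidable (Spec_card_format numb out) := by unfold Spec_card_format; infer_instance

-- ===== CLAIM (what is proved, stated in full; the proofs are below) =====
def Claim_equal_card_format : Prop := ∀ (numb : Int), Dom_card_format numb → Spec_card_format numb (card_format numb)

-- ===== LEMMAS AND PROOFS =====

-- the list A's loop produces, as a structural recursion
def pvF (i : Int) : List Char → List Char
  | [] => []
  | c :: t => (if PySem.Int.mod i 4 == 0 then [' ', c] else [c]) ++ pvF (i + 1) t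

-- the 4-char chunks of a list
def pvChunks : List Char → List (List Char)
  | [] => []
  | c :: t => (c :: t.take 3) :: pvChunks (t.drop 3)
termination_by cs => cs.length
decreasing_by simp

theorem pvChunks_nil : pvChunks [] = [] := by
  conv_lhs => rw [pvChunks.eq_def]

theorem pvChunks_cons (c : Char) (t : List Char) :
    pvChunks (c :: t) = (c :: t.take 3) :: pvChunks (t.drop 3) := by
  conv_lhs => rw [pvChunks.eq_def]

theorem pvFoldA (cs : List Char) : ∀ (i : Int) (acc : List Char),
    (PySem.List.enumerate cs i).foldl
      (fun acc p => if PySem.Int.mod p.1 4 == 0 then (acc ++ [' ']) ++ [p.2] else acc ++ [p.2]) acc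
      = acc ++ pvF i cs := by
  induction cs with
  | nil => intro i acc; simp [PySem.List.enumerate_nil, pvF]
  | cons c t ih =>
    intro i acc
    simp only [PySem.List.enumerate_cons, List.foldl_cons, ih, pvF]
    split <;> simp

theorem pvModShift (i : Int) : PySem.Int.mod (i + 4) 4 = PySem.Int.mod i 4 := by
  simp [PySem.Int.mod, Int.fmod_eq_emod]

theorem pvFShift (cs : List Char) : ∀ (i : Int), pvF (i + 4) cs = pvF i cs := by
  induction cs with
  | nil => intro i; rfl
  | cons c t ih =>
    intro i
    show (if PySem.Int.mod (i + 4) 4 == 0 then _ else _) ++ pvF (i + 4 + 1) t = _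
    rw [pvModShift, show i + 4 + 1 = (i + 1) + 4 by ring, ih]
    rfl

theorem pvMain (n : Nat) : ∀ (cs : List Char), cs.length = n →
    (pvF 0 cs = (pvChunks cs).flatMap (fun ch => ' ' :: ch)) ∧
    (∀ m : Nat, 1 ≤ m → m ≤ 3 →
      pvF ((4 - m : Nat) : Int) cs = cs.take m ++ (pvChunks (cs.drop m)).flatMap (fun ch => ' ' :: ch)) := by
  induction n using Nat.strong_induction_on with
  | _ n ih =>
    intro cs hlen
    cases cs with
    | nil =>
      refine ⟨by simp [pvF, pvChunks_nil], ?_⟩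
      intro m _ _
      simp [pvF, pvChunks_nil]
    | cons c t =>
      have ht := ih (t.length) (by simp at hlen; omega) t rfl
      constructor
      · have h1 : pvF 0 (c :: t) = [' ', c] ++ pvF 1 t := by
          show (if PySem.Int.mod 0 4 == 0 then [' ', c] else [c]) ++ pvF (0 + 1) t = _
          norm_num [PySem.Int.mod]
        have h2 := ht.2 3 (by omega) (by omega)
        norm_num at h2
        rw [h1, h2, pvChunks_cons]
        simp
      · intro m h1m hm3
        have hne : ¬ (PySem.Int.mod ((4 - m : Nat) : Int) 4 == 0) = true := by
          interval_cases m <;> decide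
        have hstep : pvF ((4 - m : Nat) : Int) (c :: t) = c :: pvF (((4 - m : Nat) : Int) + 1) t := by
          show (if PySem.Int.mod ((4 - m : Nat) : Int) 4 == 0 then [' ', c] else [c]) ++ _ = _
          rw [if_neg (by simpa using hne)]
          rfl
        rw [hstep]
        match m, h1m, hm3 with
        | 1, _, _ =>
          have he : ((4 - 1 : Nat) : Int) + 1 = (0 : Int) + 4 := by norm_num
          rw [he, pvFShift t 0, ht.1]
          simp
        | 2, _, _ =>
          have h := ht.2 1 (by omega) (by omega)
          have he : ((4 - 2 : Nat) : Int) + 1 = ((4 - 1 : Nat) : Int) := by norm_num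
          rw [he, h]
          simp
        | 3, _, _ =>
          have h := ht.2 2 (by omega) (by omega)
          have he : ((4 - 3 : Nat) : Int) + 1 = ((4 - 2 : Nat) : Int) := by norm_num
          rw [he, h]
          simp

theorem pvRange4_cons (a b : Int) (h : a < b) :
    PySem.List.pyRange a b 4 = a :: PySem.List.pyRange (a + 4) b 4 := by
  rw [PySem.List.pyRange_of_pos a b (by norm_num), PySem.List.pyRange_of_pos (a+4) b (by norm_num)]
  have hK : ((b - a + 4 - 1) / 4).toNat = (if a + 4 < b then ((b - (a+4) + 4 - 1) / 4).toNat else 0) + 1 := by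
    split <;> omega
  rw [if_pos h, hK, List.range_succ_eq_map]
  simp [List.map_map, Function.comp]
  intro k _
  ring

theorem pvRange4_shift (a b : Int) :
    PySem.List.pyRange (a + 4) b 4 = (PySem.List.pyRange a (b - 4) 4).map (· + 4) := by
  rw [PySem.List.pyRange_of_pos (a+4) b (by norm_num), PySem.List.pyRange_of_pos a (b-4) (by norm_num)]
  have h2 : b - (a + 4) + 4 - 1 = b - 4 - a + 4 - 1 := by ring
  by_cases hb : a + 4 < b
  · rw [if_pos hb, if_pos (by omega), h2]
    simp [List.map_map, Function.comp]
    intro k _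
    ring
  · rw [if_neg hb, if_neg (by omega)]
    simp

theorem pvChunkMap (n : Nat) : ∀ (cs : List Char), cs.length = n →
    (PySem.List.pyRange 0 (cs.length : Int) 4).map
      (fun i => PySem.List.slice cs (some i) (some (i + 4))) = pvChunks cs := by
  induction n using Nat.strong_induction_on with
  | _ n ih =>
    intro cs hlen
    cases cs with
    | nil =>
      rw [PySem.List.pyRange_of_pos 0 _ (show (0:Int) < 4 by norm_num)]
      simp [pvChunks_nil]
    | cons c t =>
      have hpos : (0 : Int) < ((c :: t).length : Int) := by exact_mod_cast Nat.succ_pos t.length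
      rw [pvRange4_cons 0 _ hpos, List.map_cons]
      have hfirst : PySem.List.slice (c :: t) (some 0) (some (0 + 4)) = c :: t.take 3 := by
        rw [PySem.List.slice_toNat (c :: t) (by norm_num) (by norm_num)]
        simp
      have hrest : (PySem.List.pyRange (0 + 4) ((c :: t).length : Int) 4).map
          (fun i => PySem.List.slice (c :: t) (some i) (some (i + 4)))
          = pvChunks (t.drop 3) := by
        rw [pvRange4_shift 0 ((c :: t).length : Int), List.map_map]
        by_cases h3 : 3 ≤ t.length
        · have hlen4 : ((c :: t).length : Int) - 4 = ((t.drop 3).length : Int) := by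
            simp [List.length_drop]
            omega
          rw [hlen4, ← ih ((t.drop 3).length) (by simp at hlen ⊢; omega) (t.drop 3) rfl]
          apply List.map_congr_left
          intro i hi
          have hmem := (PySem.List.mem_pyRange_iff_of_pos (show (0:Int) < 4 by norm_num) i).1 hi
          have hi0 : 0 ≤ i := hmem.1
          simp only [Function.comp]
          rw [PySem.List.slice_toNat (c :: t) (by omega) (by omega),
              PySem.List.slice_toNat (t.drop 3) (by omega) (by omega)]
          have e1 : (i + 4).toNat = i.toNat + 4 := by omega
          have e2 : (i + 4 + 4).toNat = i.toNat + 8 := by omega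
          rw [e1, e2]
          have e3 : i.toNat + 4 - i.toNat = 4 := by omega
          have e4 : (i.toNat + 8) - (i.toNat + 4) = 4 := by omega
          rw [e3, e4]
          congr 1
          rw [List.drop_drop]
          rw [show i.toNat + 4 = (i.toNat + 3) + 1 by omega, List.drop_succ_cons]
          congr 1
          omega
        · have hdrop : t.drop 3 = [] := List.drop_eq_nil_of_le (by omega)
          have hneg : ¬ (0 < ((c :: t).length : Int) - 4) := by
            simp
            omega
          rw [PySem.List.pyRange_of_pos 0 _ (show (0:Int) < 4 by norm_num), if_neg (by omega)]
          simp [hdrop, pvChunks_nil]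
      rw [hfirst, hrest, pvChunks_cons]

theorem pvJoinFlat (l : List (List Char)) : l ≠ [] →
    l.flatMap (fun ch => ' ' :: ch) = ' ' :: PySem.Chars.join [' '] l := by
  induction l with
  | nil => intro h; exact absurd rfl h
  | cons a l ih =>
    intro _
    cases l with
    | nil => simp [PySem.Chars.join_singleton]
    | cons b l' =>
      rw [List.flatMap_cons, ih (by simp), PySem.Chars.join_cons_cons]
      simp

theorem pvToCharsNeNil (n : Int) : PySem.Int.toChars n ≠ [] := by
  unfold PySem.Int.toChars
  split
  · simp
  · have h : 0 < (Nat.toDigits 10 n.toNat).length := Nat.length_toDigits_pos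
    intro hh
    rw [hh] at h
    simp at h

theorem pvConvertId (cs : List Char) : ∀ acc, cs.foldl (fun acc c => acc ++ [c]) acc = acc ++ cs := by
  induction cs with
  | nil => simp
  | cons c t ih => intro acc; simp [ih]

-- ===== VERDICT (by name: the statement is the Claim_ definition above) =====
set_option maxHeartbeats 1000000 in
theorem card_format_spec : Claim_equal_card_format := by
  intro numb _
  unfold Spec_card_format card_format card_format_alt
  have hne : (PySem.Int.toStr numb).toList ≠ [] := by
    rw [PySem.Int.toList_toStr]
    exact pvToCharsNeNil numb
  obtain ⟨c, t, hct⟩ : ∃ c t, (PySem.Int.toStr numb).toList = c :: t := by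
    cases hcs : (PySem.Int.toStr numb).toList with
    | nil => exact absurd hcs hne
    | cons c t => exact ⟨c, t, rfl⟩
  simp only []
  rw [pvFoldA, List.nil_append]
  have hA : pvF 0 ((PySem.Int.toStr numb).toList)
      = ' ' :: PySem.Chars.join [' '] (pvChunks ((PySem.Int.toStr numb).toList)) := by
    rw [(pvMain ((PySem.Int.toStr numb).toList).length _ rfl).1]
    apply pvJoinFlat
    rw [hct, pvChunks_cons]
    simp
  rw [hA, PySem.List.pop?_zero_cons]
  show pvConvertlist (PySem.Chars.join [' '] (pvChunks ((PySem.Int.toStr numb).toList))) = _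
  unfold pvConvertlist
  -- B side
  conv_rhs => rw [← String.ofList_toList (s := PySem.Str.join " " _)]
  apply congrArg String.ofList
  rw [pvConvertId, List.nil_append, PySem.Str.toList_join, List.map_map]
  have hsep : (" " : String).toList = [' '] := by decide
  rw [hsep]
  have hmaps : (List.map (String.toList ∘ fun i => PySem.Str.slice (PySem.Int.toStr numb) (some i) (some (i + 4)))
        (PySem.List.pyRange 0 (PySem.Str.len (PySem.Int.toStr numb)) 4))
      = (PySem.List.pyRange 0 (((PySem.Int.toStr numb).toList.length : Nat) : Int) 4).map
          (fun i => PySem.List.slice ((PySem.Int.toStr numb).toList) (some i) (some (i + 4))) := by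
    rw [PySem.Str.len_eq]
    apply List.map_congr_left
    intro i _
    simp only [Function.comp]
    rw [PySem.Str.toList_slice]
    rfl
  rw [hmaps, pvChunkMap ((PySem.Int.toStr numb).toList.length) _ rfl]
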